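-- pv_equiv track=rewrite | github.com/Aokison/alternating-disk-algorithm | alternating_disk.py | alternating_disk
-- ===== SOURCE A (Python) =====
-- def alternating_disk(n, L):
--   swaps = 0
--   for i in range(n):
--     pair = i
--     for j in range(i,n):
--       L[pair], L[pair+1] = L[pair+1], L[pair]
--       swaps+=1
--       pair+=2
--   return L, swaps
-- ===== SOURCE B (Python) =====
-- def alternating_disk(n, L):
--     if n <= 0:
--         return L, 0
--     m = 2 * n
--     head, tail = L[:m], L[m:]
--     return head[1::2] + head[::2] + tail, n * (n + 1) // 2
-- ===== Notes on version B (the rewrite author's own statement) =====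
-- stated objective: faster
-- what changed: Replaces the O(n^2) nested bubble-swap passes by the closed form: the rearranged list is the odd-index elements of L[:2n] followed by its even-index elements (plus the untouched tail), and the swap count is n*(n+1)//2.
import Mathlib
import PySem

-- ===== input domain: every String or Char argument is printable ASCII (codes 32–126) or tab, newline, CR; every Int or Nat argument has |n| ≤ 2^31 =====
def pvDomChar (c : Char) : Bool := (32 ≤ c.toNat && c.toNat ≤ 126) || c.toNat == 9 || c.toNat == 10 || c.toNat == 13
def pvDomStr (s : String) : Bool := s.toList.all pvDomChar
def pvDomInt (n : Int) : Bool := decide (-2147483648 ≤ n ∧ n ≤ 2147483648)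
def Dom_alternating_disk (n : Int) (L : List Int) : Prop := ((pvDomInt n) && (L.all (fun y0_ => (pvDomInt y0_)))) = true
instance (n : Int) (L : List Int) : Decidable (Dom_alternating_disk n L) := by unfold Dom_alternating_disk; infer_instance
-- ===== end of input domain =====

-- B replaces A's O(n^2) nested swap passes by the closed form "odd-index elements of L[:2n],
-- then even-index elements, then the tail; swaps = n*(n+1)//2" (objective: faster, asymptotic).
-- A mutates its list argument in place; B does not — the equivalence proved here is about the return value only.


-- ===== PORT A =====
-- body of the inner loop: 'L[pair], L[pair+1] = L[pair+1], L[pair]; swaps += 1; pair += 2'.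
-- The swap is exact whenever both indexings succeed (Pre_ guarantees that); where Python would
-- raise IndexError the list is left unchanged (those inputs are outside Pre_).
def adSwapBody (st : List Int × Int × Int) : List Int × Int × Int :=
  let L := st.1
  let pair := st.2.1
  let swaps := st.2.2
  let L' :=
    match PySem.List.pyGet? L pair, PySem.List.pyGet? L (pair + 1) with
    | some x, some y => (L.set pair.toNat y).set (pair.toNat + 1) x
    | _, _ => L
  (L', pair + 2, swaps + 1)

-- body of the outer loop: 'pair = i; for j in range(i, n): …'
def adOuterBody (n : Int) (st : List Int × Int) (i : Int) : List Int × Int :=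
  let r := (PySem.List.pyRange i n 1).foldl (fun s _j => adSwapBody s) (st.1, i, st.2)
  (r.1, r.2.2)

def alternating_disk (n : Int) (L : List Int) : List Int × Int :=
  (PySem.List.pyRange 0 n 1).foldl (adOuterBody n) (L, 0)

-- ===== PORT B =====
-- head[1::2] / head[::2]: step-2 extended slices with nonnegative bounds, ported by hand (exact there).
def everyOther : List Int → List Int
  | [] => []
  | [x] => [x]
  | x :: _ :: r => x :: everyOther r

def alternating_disk_alt (n : Int) (L : List Int) : List Int × Int :=
  if n ≤ 0 then (L, 0)
  else
    let m : Int := 2 * n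
    let head := PySem.List.slice L none (some m)
    let tail := PySem.List.slice L (some m) none
    (everyOther (head.drop 1) ++ everyOther head ++ tail, PySem.Int.floordiv (n * (n + 1)) 2)

-- ===== PRECONDITION & SPEC =====
-- Pre_ excludes exactly the inputs where A raises IndexError: 0 < n with fewer than 2*n elements.
def Pre_alternating_disk (n : Int) (L : List Int) : Prop := n ≤ 0 ∨ 2 * n ≤ (L.length : Int)
instance (n : Int) (L : List Int) : Decidable (Pre_alternating_disk n L) := by unfold Pre_alternating_disk; infer_instance
def pvWitness_alternating_disk : Int × List Int := (2, [3, 1, 4, 1])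

def Spec_alternating_disk (n : Int) (L : List Int) (out : List Int × Int) : Prop := out = alternating_disk_alt n L
instance (n : Int) (L : List Int) (out : List Int × Int) : Decidable (Spec_alternating_disk n L out) := by unfold Spec_alternating_disk; infer_instance

-- ===== CLAIM (what is proved, stated in full; the proofs are below) =====
def Claim_equal_alternating_disk : Prop := ∀ (n : Int) (L : List Int), Dom_alternating_disk n L → Pre_alternating_disk n L → Spec_alternating_disk n L (alternating_disk n L)

-- ===== LEMMAS AND PROOFS =====

-- a0 :: b0 :: a1 :: b1 :: … — the shape of the region of L the swaps act on
def interleave : List Int → List Int → List Int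
  | [], ys => ys
  | x :: xs, ys => x :: interleave ys xs
  termination_by xs ys => xs.length + ys.length
  decreasing_by simp; omega

-- (evens of the first 2*c elements, odds of the first 2*c elements)
def deinter : Nat → List Int → List Int × List Int
  | 0, _ => ([], [])
  | c + 1, x :: y :: r => ((deinter c r).1.cons x, (deinter c r).2.cons y)
  | _ + 1, _ => ([], [])

-- number of swaps A performs: tri n = n + (n-1) + … + 1
def tri : Nat → Nat
  | 0 => 0
  | c + 1 => (c + 1) + tri c

theorem interleave_cons₂ (x y : Int) (xs ys : List Int) :
    interleave (x :: xs) (y :: ys) = x :: y :: interleave xs ys := by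
  simp [interleave]

theorem interleave_length (xs ys : List Int) : (interleave xs ys).length = xs.length + ys.length := by
  induction xs, ys using interleave.induct with
  | case1 ys => simp [interleave]
  | case2 x xs ys ih => simp [interleave, ih]; omega

theorem interleave_concat : ∀ (xs ys : List Int) (v : Int), xs.length = ys.length →
    interleave (xs ++ [v]) ys = interleave xs ys ++ [v] := by
  intro xs
  induction xs with
  | nil =>
    intro ys v h
    cases ys with
    | nil => simp [interleave]
    | cons y ys => simp at h
  | cons x xs ih =>
    intro ys v h
    cases ys with
    | nil => simp at h
    | cons y ys =>
      simp only [List.cons_append, interleave]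
      rw [ih ys v (by simpa using h)]

theorem everyOther_interleave : ∀ (xs ys : List Int), ys.length ≤ xs.length → xs.length ≤ ys.length + 1 →
    everyOther (interleave xs ys) = xs := by
  intro xs
  induction xs with
  | nil =>
    intro ys h1 h2
    cases ys with
    | nil => simp [interleave, everyOther]
    | cons y ys => simp at h1
  | cons x xs ih =>
    intro ys h1 h2
    cases ys with
    | nil =>
      have : xs = [] := by
        cases xs with
        | nil => rfl
        | cons a l => simp at h2
      subst this
      simp [interleave, everyOther]
    | cons y ys =>
      rw [interleave_cons₂]
      show x :: everyOther (interleave xs ys) = x :: xs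
      rw [ih ys (by simp at h1; omega) (by simp at h2; omega)]

theorem deinter_spec : ∀ (c : Nat) (L : List Int), 2 * c ≤ L.length →
    (deinter c L).1.length = c ∧ (deinter c L).2.length = c ∧
      interleave (deinter c L).1 (deinter c L).2 ++ L.drop (2 * c) = L := by
  intro c
  induction c with
  | zero => intro L _; simp [deinter, interleave]
  | succ c ih =>
    intro L hlen
    cases L with
    | nil => simp at hlen
    | cons x L =>
      cases L with
      | nil => simp at hlen; omega
      | cons y r =>
        have hr : 2 * c ≤ r.length := by simp at hlen; omega
        obtain ⟨h1, h2, h3⟩ := ih r hr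
        refine ⟨by simp [deinter, h1], by simp [deinter, h2], ?_⟩
        simp only [deinter, interleave_cons₂]
        have : 2 * (c + 1) = (2 * c) + 1 + 1 := by omega
        rw [this]
        simp only [List.drop_succ_cons]
        simpa using h3

theorem inner_fold_eq_iter : ∀ (c : Nat) (i n : Int) (st : List Int × Int × Int), (n - i).toNat = c →
    (PySem.List.pyRange i n 1).foldl (fun s _j => adSwapBody s) st = adSwapBody^[c] st := by
  intro c
  induction c with
  | zero =>
    intro i n st h
    rw [PySem.List.pyRange_one_eq_nil (by omega)]
    rfl
  | succ c ih =>
    intro i n st h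
    rw [PySem.List.pyRange_one_cons (by omega), List.foldl_cons, ih (i + 1) n _ (by omega),
      Function.iterate_succ_apply]

theorem adSwapBody_step (P : List Int) (a b : Int) (R : List Int) (s : Int) :
    adSwapBody (P ++ a :: b :: R, (P.length : Int), s) = (P ++ b :: a :: R, (P.length : Int) + 2, s + 1) := by
  have h1 : PySem.List.pyGet? (P ++ a :: b :: R) (P.length : Int) = some a :=
    PySem.List.pyGet?_append_length P (b :: R) a
  have h2 : PySem.List.pyGet? (P ++ a :: b :: R) ((P.length : Int) + 1) = some b := by
    have := PySem.List.pyGet?_append_right (pre := P) (ys := a :: b :: R) (k := 1)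
    simpa using this
  have eset : ((P ++ a :: b :: R).set P.length b).set (P.length + 1) a = P ++ b :: a :: R := by
    have e1 : (P ++ a :: b :: R).set P.length b = P ++ b :: b :: R := by simp
    rw [e1]
    have e2 : P ++ b :: b :: R = (P ++ [b]) ++ b :: R := by simp
    have e3 : P.length + 1 = (P ++ [b]).length := by simp
    rw [e2, e3]
    simp
  simp only [adSwapBody, h1, h2, Int.toNat_natCast, eset]

theorem iter_swap_spec : ∀ (xs ys : List Int), xs.length = ys.length → ∀ (P T : List Int) (s : Int),
    adSwapBody^[xs.length] (P ++ interleave xs ys ++ T, (P.length : Int), s)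
      = (P ++ interleave ys xs ++ T, (P.length : Int) + 2 * xs.length, s + xs.length) := by
  intro xs
  induction xs with
  | nil =>
    intro ys h P T s
    cases ys with
    | cons y ys => simp at h
    | nil => simp [interleave]
  | cons x xs ih =>
    intro ys h P T s
    cases ys with
    | nil => simp at h
    | cons y ys =>
      have hlen : xs.length = ys.length := by simpa using h
      rw [show (x :: xs).length = xs.length + 1 from rfl, Function.iterate_succ_apply]
      have hstate : (P ++ interleave (x :: xs) (y :: ys) ++ T, ((P.length : Nat) : Int), s)
          = (P ++ x :: y :: (interleave xs ys ++ T), ((P.length : Nat) : Int), s) := by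
        simp [interleave_cons₂]
      rw [hstate, adSwapBody_step P x y (interleave xs ys ++ T) s]
      have e : P ++ y :: x :: (interleave xs ys ++ T) = (P ++ [y, x]) ++ interleave xs ys ++ T := by
        simp
      have e2 : (P.length : Int) + 2 = (((P ++ [y, x]).length : Nat) : Int) := by
        simp only [List.length_append, List.length_cons, List.length_nil]
        push_cast
        omega
      rw [e, e2, ih ys hlen (P ++ [y, x]) T (s + 1)]
      simp only [interleave_cons₂, Prod.mk.injEq, List.length_append, List.length_cons,
        List.length_nil]
      refine ⟨by simp, by push_cast; omega, by push_cast; omega⟩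

theorem outer_spec : ∀ (c : Nat) (i n : Int) (bs0 as bs1 T : List Int) (s : Int),
    0 ≤ i → (n - i).toNat = c → (bs0.length : Int) = i → as.length = c → bs1.length = c →
    (PySem.List.pyRange i n 1).foldl (adOuterBody n) (bs0 ++ interleave as bs1 ++ T, s)
      = (bs0 ++ bs1 ++ as ++ T, s + (tri c : Int)) := by
  intro c
  induction c with
  | zero =>
    intro i n bs0 as bs1 T s hi hc hb0 ha hb
    rw [List.length_eq_zero_iff] at ha hb
    subst ha; subst hb
    rw [PySem.List.pyRange_one_eq_nil (by omega)]
    simp [interleave, tri]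
  | succ c ih =>
    intro i n bs0 as bs1 T s hi hc hb0 ha hb
    rw [PySem.List.pyRange_one_cons (by omega), List.foldl_cons]
    have hfirst : adOuterBody n (bs0 ++ interleave as bs1 ++ T, s) i
        = (bs0 ++ interleave bs1 as ++ T, s + ((c + 1 : Nat) : Int)) := by
      unfold adOuterBody
      rw [inner_fold_eq_iter (c + 1) i n _ (by omega), ← hb0, ← ha,
        iter_swap_spec as bs1 (by omega) bs0 T s]
    rw [hfirst]
    rcases List.eq_nil_or_concat as with hnil | ⟨as', al, hconcat⟩
    · rw [hnil] at ha; simp at ha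
    cases bs1 with
    | nil => simp at hb
    | cons b bs1' =>
      subst hconcat
      simp only [List.concat_eq_append] at ha ⊢
      have ha' : as'.length = c := by simp at ha; omega
      have hb1' : bs1'.length = c := by simpa using hb
      have hint : interleave (b :: bs1') (as' ++ [al]) = b :: (interleave as' bs1' ++ [al]) := by
        rw [show interleave (b :: bs1') (as' ++ [al]) = b :: interleave (as' ++ [al]) bs1' from
          by simp [interleave]]
        rw [interleave_concat as' bs1' al (by omega)]
      rw [hint]
      have estate : bs0 ++ (b :: (interleave as' bs1' ++ [al])) ++ T
          = (bs0 ++ [b]) ++ interleave as' bs1' ++ (al :: T) := by simp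
      rw [estate]
      rw [ih (i + 1) n (bs0 ++ [b]) as' bs1' (al :: T) (s + ((c + 1 : Nat) : Int))
        (by omega) (by omega) (by simp; omega) ha' hb1']
      simp only [Prod.mk.injEq]
      refine ⟨by simp, ?_⟩
      simp only [tri]
      push_cast
      ring

theorem tri_closed (c : Nat) : 2 * (tri c : Int) = (c : Int) * ((c : Int) + 1) := by
  induction c with
  | zero => simp [tri]
  | succ c ih =>
    simp only [tri]
    push_cast
    push_cast at ih
    ring_nf
    ring_nf at ih
    linarith

-- ===== VERDICT (by name: the statement is the Claim_ definition above) =====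
theorem alternating_disk_spec : Claim_equal_alternating_disk := by
  intro n L _ hpre
  unfold Spec_alternating_disk alternating_disk
  by_cases hn : n ≤ 0
  · rw [PySem.List.pyRange_one_eq_nil (by omega)]
    simp [alternating_disk_alt, hn]
  · have hpos : 0 < n := by omega
    have h2n : 2 * n ≤ (L.length : Int) := by
      rcases hpre with h | h
      · omega
      · exact h
    set c : Nat := n.toNat with hcdef
    have hcn : (c : Int) = n := by omega
    have hc : 2 * c ≤ L.length := by omega
    obtain ⟨ha, hb, hL⟩ := deinter_spec c L hc
    set as := (deinter c L).1 with hasdef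
    set bs := (deinter c L).2 with hbsdef
    have hIlen : (interleave as bs).length = 2 * c := by
      rw [interleave_length]; omega
    have hA : (PySem.List.pyRange 0 n 1).foldl (adOuterBody n) (L, 0)
        = (bs ++ as ++ L.drop (2 * c), 0 + (tri c : Int)) := by
      have hout := outer_spec c 0 n [] as bs (L.drop (2 * c)) 0 (by omega) (by omega) (by simp) ha hb
      simp only [List.nil_append] at hout
      rw [hL] at hout
      exact hout
    rw [hA]
    have hB : alternating_disk_alt n L
        = (everyOther ((PySem.List.slice L none (some (2 * n))).drop 1)
            ++ everyOther (PySem.List.slice L none (some (2 * n)))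
            ++ PySem.List.slice L (some (2 * n)) none,
           PySem.Int.floordiv (n * (n + 1)) 2) := by
      unfold alternating_disk_alt
      rw [if_neg hn]
    rw [hB]
    have hhead : PySem.List.slice L none (some (2 * n)) = interleave as bs := by
      rw [PySem.List.slice_to L (by omega)]
      have h2 : (2 * n).toNat = 2 * c := by omega
      rw [h2, ← hL, List.take_left' hIlen]
    have htail : PySem.List.slice L (some (2 * n)) none = L.drop (2 * c) := by
      rw [PySem.List.slice_from L (by omega)]
      have h2 : (2 * n).toNat = 2 * c := by omega
      rw [h2]
    rw [hhead, htail]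
    have hev : everyOther (interleave as bs) = as :=
      everyOther_interleave as bs (by omega) (by omega)
    have hcpos : 0 < c := by omega
    obtain ⟨a, as', haeq⟩ : ∃ a as', as = a :: as' := by
      cases hx : as with
      | nil => rw [hx] at ha; simp at ha; omega
      | cons a as' => exact ⟨a, as', rfl⟩
    have hod : everyOther ((interleave as bs).drop 1) = bs := by
      rw [haeq]
      rw [show interleave (a :: as') bs = a :: interleave bs as' from by simp [interleave]]
      rw [List.drop_one, List.tail_cons]
      have ha' : as'.length = c - 1 := by
        rw [haeq] at ha; simp at ha; omega
      exact everyOther_interleave bs as' (by omega) (by omega)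
    rw [hev, hod]
    have hsw : PySem.Int.floordiv (n * (n + 1)) 2 = (tri c : Int) := by
      rw [PySem.Int.floordiv_eq_ediv_of_pos (by omega)]
      have htc := tri_closed c
      rw [hcn] at htc
      generalize n * (n + 1) = m at htc ⊢
      omega
    rw [hsw]
    simp
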